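-- pv_equiv track=rewrite | github.com/baziz-meriem/Problem-Solving | 3170-find-indices-with-index-and-value-difference-ii/find-indices-with-index-and-value-difference-ii.py | findIndices
-- ===== SOURCE A (Python) =====
-- from typing import List
--
-- def findIndices(nums: List[int], indexDifference: int, valueDifference: int) -> List[int]:
--
--     min_max_dict ={}
--     min_max_dict[len(nums)-1] = [   [nums[len(nums)-1],len(nums)-1],#min,idx
--                                     [nums[len(nums)-1],len(nums)-1]#max,idx
--                                     ]
--     for n in range(len(nums)-2,-1,-1):
--         max_val = max(nums[n], min_max_dict[n+1][1][0])
--         max_idx = n if nums[n]>min_max_dict[n+1][1][0] else min_max_dict[n+1][1][1]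
--
--         min_val =  min(nums[n], min_max_dict[n+1][0][0])
--         min_idx = n if nums[n]<min_max_dict[n+1][0][0] else min_max_dict[n+1][0][1]
--
--         min_max_dict[n] = [[min_val,min_idx],[max_val,max_idx]]
--
--
--     for idx,val in enumerate(nums[:len(nums)-indexDifference]):
--         max_val = min_max_dict[idx+indexDifference][1][0]
--         idx_max = min_max_dict[idx+indexDifference][1][1]
--
--         min_val = min_max_dict[idx+indexDifference][0][0]
--         idx_min = min_max_dict[idx+indexDifference][0][1]
--
--         if abs(max_val-val)>= valueDifference:
--             return [idx,idx_max]
--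
--         elif abs(min_val-val)>= valueDifference:
--             return [idx,idx_min]
--         else:
--             continue
--     return [-1,-1]
-- ===== SOURCE B (Python) =====
-- from typing import List
--
-- def findIndices(nums: List[int], indexDifference: int, valueDifference: int) -> List[int]:
--     # Single backward pass: fold the window-edge element into running extremes,
--     # overwrite the answer so the smallest qualifying left index wins.
--     n = len(nums)
--     best = [-1, -1]
--     max_val = max_idx = min_val = min_idx = None
--     for i in range(n - 1 - indexDifference, -1, -1):
--         j = i + indexDifference
--         v = nums[j]
--         if max_val is None or v > max_val:
--             max_val, max_idx = v, j
--         if min_val is None or v < min_val: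
--             min_val, min_idx = v, j
--         if abs(max_val - nums[i]) >= valueDifference:
--             best = [i, max_idx]
--         elif abs(min_val - nums[i]) >= valueDifference:
--             best = [i, min_idx]
--     return best
-- ===== Notes on version B (the rewrite author's own statement) =====
-- stated objective: simpler
-- what changed: Replaced the suffix-min/max dictionary (built in a separate backward pass and then scanned forward with early return) by a single backward loop that keeps running (max,idx)/(min,idx) values in O(1) space and overwrites the stored answer so the smallest qualifying left index wins.
import Mathlib
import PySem

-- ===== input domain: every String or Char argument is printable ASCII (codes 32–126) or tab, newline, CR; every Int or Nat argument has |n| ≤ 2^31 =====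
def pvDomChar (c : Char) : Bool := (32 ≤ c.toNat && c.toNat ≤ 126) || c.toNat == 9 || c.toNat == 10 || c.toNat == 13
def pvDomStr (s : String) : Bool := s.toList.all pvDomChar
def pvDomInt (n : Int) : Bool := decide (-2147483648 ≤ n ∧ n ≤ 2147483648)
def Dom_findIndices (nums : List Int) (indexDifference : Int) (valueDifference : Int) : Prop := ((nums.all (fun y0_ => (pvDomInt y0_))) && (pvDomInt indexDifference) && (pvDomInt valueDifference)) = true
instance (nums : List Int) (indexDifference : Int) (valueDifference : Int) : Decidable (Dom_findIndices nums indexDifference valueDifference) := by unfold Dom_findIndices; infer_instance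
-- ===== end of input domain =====

-- B replaces A's suffix-min/max dict (built in a separate pass, then scanned with early return)
-- by a single backward pass keeping running (max,idx)/(min,idx) state and overwriting the answer,
-- so the smallest qualifying left index wins; objective: simpler (one pass, O(1) extra space).
-- Entry type of A's dict values: ((min_val, min_idx), (max_val, max_idx)).

-- ===== PORT A =====
-- A's second loop: early return on the first qualifying index.
def findIndicesLoopA (dict : PySem.Dict Int ((Int × Int) × (Int × Int)))
    (indexDifference valueDifference : Int) : List (Int × Int) → List Int
  | [] => [-1, -1]
  | (idx, val) :: rest =>
    let e := dict.getD (idx + indexDifference) ((0, 0), (0, 0))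
    if |e.2.1 - val| ≥ valueDifference then [idx, e.2.2]
    else if |e.1.1 - val| ≥ valueDifference then [idx, e.1.2]
    else findIndicesLoopA dict indexDifference valueDifference rest

def findIndices (nums : List Int) (indexDifference : Int) (valueDifference : Int) : List Int :=
  let n : Int := (nums.length : Int)
  let last := PySem.List.pyGetD nums (n - 1) 0
  let d0 : PySem.Dict Int ((Int × Int) × (Int × Int)) :=
    (PySem.Dict.empty).insert (n - 1) ((last, n - 1), (last, n - 1))
  let dict := (PySem.List.pyRange (n - 2) (-1) (-1)).foldl (fun dict k =>
      let v := PySem.List.pyGetD nums k 0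
      let e := dict.getD (k + 1) ((0, 0), (0, 0))
      let maxv := max v e.2.1
      let maxi := if v > e.2.1 then k else e.2.2
      let minv := min v e.1.1
      let mini := if v < e.1.1 then k else e.1.2
      dict.insert k ((minv, mini), (maxv, maxi))) d0
  findIndicesLoopA dict indexDifference valueDifference
    (PySem.List.enumerate (PySem.List.slice nums none (some (n - indexDifference))) 0)

-- ===== PORT B =====
def findIndices_alt (nums : List Int) (indexDifference : Int) (valueDifference : Int) : List Int :=
  let n : Int := (nums.length : Int)
  let st := (PySem.List.pyRange (n - 1 - indexDifference) (-1) (-1)).foldl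
    (fun (s : Option (Int × Int) × Option (Int × Int) × List Int) i =>
      let j := i + indexDifference
      let v := PySem.List.pyGetD nums j 0
      let mx := match s.1 with
        | none => (v, j)
        | some (mv, mi) => if v > mv then (v, j) else (mv, mi)
      let mn := match s.2.1 with
        | none => (v, j)
        | some (mv, mi) => if v < mv then (v, j) else (mv, mi)
      let cur := PySem.List.pyGetD nums i 0
      let best := if |mx.1 - cur| ≥ valueDifference then [i, mx.2]
                  else if |mn.1 - cur| ≥ valueDifference then [i, mn.2]
                  else s.2.2
      (some mx, some mn, best)) (none, none, ([-1, -1] : List Int))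
  st.2.2

-- ===== PRECONDITION & SPEC =====
-- Pre_ excludes exactly the inputs on which A raises: the empty list (IndexError on nums[-1]),
-- negative indexDifference (KeyError on a negative dict key), and len < indexDifference < 2*len
-- (the slice end goes negative, so the loop runs and hits a key past the end of the dict: KeyError).
def Pre_findIndices (nums : List Int) (indexDifference : Int) (valueDifference : Int) : Prop :=
  nums ≠ [] ∧ 0 ≤ indexDifference ∧
    (indexDifference ≤ (nums.length : Int) ∨ 2 * (nums.length : Int) ≤ indexDifference)
instance (nums : List Int) (indexDifference : Int) (valueDifference : Int) : Decidable (Pre_findIndices nums indexDifference valueDifference) := by unfold Pre_findIndices; infer_instance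

def pvWitness_findIndices : List Int × Int × Int := ([3, 0, 4], 1, 3)

def Spec_findIndices (nums : List Int) (indexDifference : Int) (valueDifference : Int) (out : List Int) : Prop := out = findIndices_alt nums indexDifference valueDifference
instance (nums : List Int) (indexDifference : Int) (valueDifference : Int) (out : List Int) : Decidable (Spec_findIndices nums indexDifference valueDifference out) := by unfold Spec_findIndices; infer_instance

-- ===== CLAIM (what is proved, stated in full; the proofs are below) =====
def Claim_equal_findIndices : Prop := ∀ (nums : List Int) (indexDifference : Int) (valueDifference : Int), Dom_findIndices nums indexDifference valueDifference → Pre_findIndices nums indexDifference valueDifference → Spec_findIndices nums indexDifference valueDifference (findIndices nums indexDifference valueDifference)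

-- ===== LEMMAS AND PROOFS =====

-- A's combine step for suffix extremes: ((min,idx),(max,idx)), strict comparison keeps the rightmost index.
def pvComb (k v : Int) (e : (Int × Int) × (Int × Int)) : (Int × Int) × (Int × Int) :=
  ((min v e.1.1, if v < e.1.1 then k else e.1.2),
   (max v e.2.1, if v > e.2.1 then k else e.2.2))

def pvExt : List (Int × Int) → (Int × Int) × (Int × Int)
  | [] => ((0, 0), (0, 0))
  | [(i, v)] => ((v, i), (v, i))
  | (i, v) :: p :: rest => pvComb i v (pvExt (p :: rest))

-- extremes (with rightmost tie index) of nums[k:]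
def pvExtAt (nums : List Int) (k : Nat) : (Int × Int) × (Int × Int) :=
  pvExt (PySem.List.enumerate (nums.drop k) (k : Int))

-- the decision both programs make at left index i
def pvHit (nums : List Int) (d v : Int) (i : Int) : Option (List Int) :=
  let e := pvExtAt nums (i + d).toNat
  let cur := PySem.List.pyGetD nums i 0
  if |e.2.1 - cur| ≥ v then some [i, e.2.2]
  else if |e.1.1 - cur| ≥ v then some [i, e.1.2] else none

theorem pvExt_cons (i v : Int) (l : List (Int × Int)) (h : l ≠ []) :
    pvExt ((i, v) :: l) = pvComb i v (pvExt l) := by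
  cases l with
  | nil => exact absurd rfl h
  | cons p rest => rfl

theorem pvExtAt_last (nums : List Int) (k : Nat) (h : k + 1 = nums.length) :
    pvExtAt nums k = ((nums.getD k 0, (k : Int)), (nums.getD k 0, (k : Int))) := by
  have hk : k < nums.length := by omega
  unfold pvExtAt
  rw [List.drop_eq_getElem_cons hk, List.drop_eq_nil_of_le (by omega)]
  rw [PySem.List.enumerate_cons, PySem.List.enumerate_nil]
  rw [List.getD_eq_getElem _ _ hk]
  rfl

theorem pvExtAt_step (nums : List Int) (k : Nat) (h : k + 1 < nums.length) :
    pvExtAt nums k = pvComb (k : Int) (nums.getD k 0) (pvExtAt nums (k + 1)) := by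
  unfold pvExtAt
  rw [List.drop_eq_getElem_cons (by omega : k < nums.length)]
  rw [PySem.List.enumerate_cons]
  rw [pvExt_cons _ _ _ (by
    intro hnil
    have := congrArg List.length hnil
    simp [PySem.List.length_enumerate] at this
    omega)]
  have : ((k : Int) + 1) = ((k + 1 : Nat) : Int) := by push_cast; ring
  rw [this, List.getD_eq_getElem _ _ (by omega : k < nums.length)]

theorem pv_findSome?_map {α β γ : Type} (g : α → β) (f : β → Option γ) (l : List α) :
    (l.map g).findSome? f = l.findSome? (fun x => f (g x)) := by
  induction l with
  | nil => rfl
  | cons x t ih => simp [List.findSome?_cons, ih]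

theorem pv_findSome?_congr {α β : Type} (f g : α → Option β) (l : List α)
    (h : ∀ x ∈ l, f x = g x) : l.findSome? f = l.findSome? g := by
  induction l with
  | nil => rfl
  | cons x t ih =>
    simp only [List.findSome?_cons, h x (List.mem_cons_self ..)]
    cases g x with
    | some r => rfl
    | none => exact ih (fun y hy => h y (List.mem_cons_of_mem _ hy))

theorem pv_getD_take {α : Type} (xs : List α) (m k : Nat) (dflt : α) (h : k < m) :
    (xs.take m).getD k dflt = xs.getD k dflt := by
  by_cases hk : k < xs.length
  · rw [List.getD_eq_getElem _ _ (by simp [List.length_take]; omega),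
      List.getD_eq_getElem _ _ hk]
    simp [List.getElem_take]
  · rw [List.getD_eq_default _ _ (by simp [List.length_take]; omega),
      List.getD_eq_default _ _ (by omega)]

-- A's early-return scan is a findSome?
theorem loopA_eq (dict : PySem.Dict Int ((Int × Int) × (Int × Int)))
    (d v : Int) (l : List (Int × Int)) :
    findIndicesLoopA dict d v l =
      (l.findSome? (fun p =>
        let e := dict.getD (p.1 + d) ((0, 0), (0, 0))
        if |e.2.1 - p.2| ≥ v then some [p.1, e.2.2]
        else if |e.1.1 - p.2| ≥ v then some [p.1, e.1.2] else none)).getD [-1, -1] := by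
  induction l with
  | nil => rfl
  | cons p t ih =>
    obtain ⟨idx, val⟩ := p
    simp only [findIndicesLoopA, List.findSome?_cons]
    by_cases h1 : |(dict.getD (idx + d) ((0, 0), (0, 0))).2.1 - val| ≥ v
    · simp [h1]
    · by_cases h2 : |(dict.getD (idx + d) ((0, 0), (0, 0))).1.1 - val| ≥ v
      · simp [h1, h2]
      · simp [h1, h2, ih]

-- the dict built by A's first loop holds the suffix extremes
theorem dictFold (nums : List Int) :
    ∀ (c : Nat), c ≤ nums.length - 1 →
    ∀ (din : PySem.Dict Int ((Int × Int) × (Int × Int))),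
    (∀ k : Nat, c ≤ k → k < nums.length →
        din.getD (k : Int) ((0, 0), (0, 0)) = pvExtAt nums k) →
    ∀ k : Nat, k < nums.length →
      ((PySem.List.pyRange ((c : Int) - 1) (-1) (-1)).foldl (fun dict k =>
        let v := PySem.List.pyGetD nums k 0
        let e := dict.getD (k + 1) ((0, 0), (0, 0))
        let maxv := max v e.2.1
        let maxi := if v > e.2.1 then k else e.2.2
        let minv := min v e.1.1
        let mini := if v < e.1.1 then k else e.1.2
        dict.insert k ((minv, mini), (maxv, maxi))) din).getD (k : Int) ((0, 0), (0, 0))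
        = pvExtAt nums k := by
  intro c
  induction c with
  | zero =>
    intro _ din hdin k hk
    rw [show ((0 : Nat) : Int) - 1 = -1 by norm_num,
      PySem.List.pyRange_neg_one_eq_nil (by norm_num)]
    exact hdin k (Nat.zero_le _) hk
  | succ c ih =>
    intro hc din hdin k hk
    rw [show ((c + 1 : Nat) : Int) - 1 = (c : Int) by push_cast; ring]
    rw [PySem.List.pyRange_neg_one_cons (by omega : (-1 : Int) < (c : Int))]
    rw [List.foldl_cons]
    exact ih (by omega) _ (by
      intro k' hk1 hk2
      simp only []
      rw [PySem.Dict.getD_insert]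
      by_cases heq : (k' : Int) = (c : Int)
      · rw [if_pos heq]
        have hk'c : k' = c := by exact_mod_cast heq
        subst hk'c
        have hcn : k' + 1 < nums.length := by omega
        rw [show ((k' : Int) + 1) = ((k' + 1 : Nat) : Int) by push_cast; ring]
        rw [hdin (k' + 1) (by omega) hcn]
        rw [pvExtAt_step nums k' hcn]
        simp [pvComb, PySem.List.pyGetD_natCast]
      · rw [if_neg heq]
        have hck : c < k' := by
          rcases Nat.lt_or_ge c k' with h | h
          · exact h
          · exact absurd (show (k' : Int) = (c : Int) by exact_mod_cast (by omega : k' = c)) heq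
        exact hdin k' (by omega) hk2) k hk


-- B's backward fold computes the first hit, starting from correct running extremes
theorem foldB (nums : List Int) (d v : Int) (hd : 0 ≤ d) :
    ∀ (c : Nat), (c : Int) + d ≤ (nums.length : Int) - 1 →
    ∀ (bestin : List Int) (mxp mnp : Int × Int),
      (mnp, mxp) = pvExtAt nums (c + d.toNat) →
    (((PySem.List.pyRange ((c : Int) - 1) (-1) (-1)).foldl
      (fun (s : Option (Int × Int) × Option (Int × Int) × List Int) i =>
        let j := i + d
        let vv := PySem.List.pyGetD nums j 0
        let mx := match s.1 with
          | none => (vv, j)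
          | some (mv, mi) => if vv > mv then (vv, j) else (mv, mi)
        let mn := match s.2.1 with
          | none => (vv, j)
          | some (mv, mi) => if vv < mv then (vv, j) else (mv, mi)
        let cur := PySem.List.pyGetD nums i 0
        let best := if |mx.1 - cur| ≥ v then [i, mx.2]
                    else if |mn.1 - cur| ≥ v then [i, mn.2]
                    else s.2.2
        (some mx, some mn, best)) (some mxp, some mnp, bestin)).2.2)
      = ((PySem.List.pyRange 0 (c : Int) 1).findSome? (pvHit nums d v)).getD bestin := by
  intro c
  induction c with
  | zero =>
    intro _ bestin mxp mnp _
    rw [show ((0 : Nat) : Int) - 1 = -1 by norm_num,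
      PySem.List.pyRange_neg_one_eq_nil (by norm_num),
      PySem.List.pyRange_one_eq_nil (by norm_num)]
    rfl
  | succ c ih =>
    intro hc bestin mxp mnp he
    obtain ⟨mxv, mxi⟩ := mxp
    obtain ⟨mnv, mni⟩ := mnp
    have hdn : (d.toNat : Int) = d := Int.toNat_of_nonneg hd
    have hcast : ((c + d.toNat : Nat) : Int) = (c : Int) + d := by push_cast; omega
    rw [show ((c + 1 : Nat) : Int) - 1 = (c : Int) by push_cast; ring]
    rw [PySem.List.pyRange_neg_one_cons (by omega : (-1 : Int) < (c : Int))]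
    rw [List.foldl_cons]
    show (((PySem.List.pyRange ((c : Int) - 1) (-1) (-1)).foldl
        (fun (s : Option (Int × Int) × Option (Int × Int) × List Int) i =>
        let j := i + d
        let vv := PySem.List.pyGetD nums j 0
        let mx := match s.1 with
          | none => (vv, j)
          | some (mv, mi) => if vv > mv then (vv, j) else (mv, mi)
        let mn := match s.2.1 with
          | none => (vv, j)
          | some (mv, mi) => if vv < mv then (vv, j) else (mv, mi)
        let cur := PySem.List.pyGetD nums i 0
        let best := if |mx.1 - cur| ≥ v then [i, mx.2]
                    else if |mn.1 - cur| ≥ v then [i, mn.2]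
                    else s.2.2
        (some mx, some mn, best))
        (some (if PySem.List.pyGetD nums ((c : Int) + d) 0 > mxv then (PySem.List.pyGetD nums ((c : Int) + d) 0, (c : Int) + d) else (mxv, mxi)),
         some (if PySem.List.pyGetD nums ((c : Int) + d) 0 < mnv then (PySem.List.pyGetD nums ((c : Int) + d) 0, (c : Int) + d) else (mnv, mni)),
         if |(if PySem.List.pyGetD nums ((c : Int) + d) 0 > mxv then (PySem.List.pyGetD nums ((c : Int) + d) 0, (c : Int) + d) else (mxv, mxi)).1 - PySem.List.pyGetD nums ((c : Int)) 0| ≥ v then [((c : Int)), (if PySem.List.pyGetD nums ((c : Int) + d) 0 > mxv then (PySem.List.pyGetD nums ((c : Int) + d) 0, (c : Int) + d) else (mxv, mxi)).2]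
         else if |(if PySem.List.pyGetD nums ((c : Int) + d) 0 < mnv then (PySem.List.pyGetD nums ((c : Int) + d) 0, (c : Int) + d) else (mnv, mni)).1 - PySem.List.pyGetD nums ((c : Int)) 0| ≥ v then [((c : Int)), (if PySem.List.pyGetD nums ((c : Int) + d) 0 < mnv then (PySem.List.pyGetD nums ((c : Int) + d) 0, (c : Int) + d) else (mnv, mni)).2]
         else bestin)).2.2)
      = ((PySem.List.pyRange 0 ((c + 1 : Nat) : Int) 1).findSome? (pvHit nums d v)).getD bestin
    have hvv : PySem.List.pyGetD nums ((c : Int) + d) 0 = nums.getD (c + d.toNat) 0 := by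
      rw [← hcast, PySem.List.pyGetD_natCast]
    have hkn : c + d.toNat + 1 < nums.length := by omega
    have hstep : pvExtAt nums (c + d.toNat) =
        ((min (nums.getD (c + d.toNat) 0) mnv,
          if nums.getD (c + d.toNat) 0 < mnv then (c : Int) + d else mni),
         (max (nums.getD (c + d.toNat) 0) mxv,
          if nums.getD (c + d.toNat) 0 > mxv then (c : Int) + d else mxi)) := by
      rw [pvExtAt_step nums (c + d.toNat) hkn]
      rw [show c + d.toNat + 1 = (c + 1) + d.toNat by omega, ← he]
      simp only [pvComb]
      rw [hcast]
    have hstep2 : (pvExtAt nums (c + d.toNat)).2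
        = (max (nums.getD (c + d.toNat) 0) mxv,
           if nums.getD (c + d.toNat) 0 > mxv then (c : Int) + d else mxi) := by
      rw [hstep]
    have hstep1 : (pvExtAt nums (c + d.toNat)).1
        = (min (nums.getD (c + d.toNat) 0) mnv,
           if nums.getD (c + d.toNat) 0 < mnv then (c : Int) + d else mni) := by
      rw [hstep]
    have hmx : (if PySem.List.pyGetD nums ((c : Int) + d) 0 > mxv then (PySem.List.pyGetD nums ((c : Int) + d) 0, (c : Int) + d) else (mxv, mxi)) = (pvExtAt nums (c + d.toNat)).2 := by
      rw [hvv, hstep2]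
      by_cases h : nums.getD (c + d.toNat) 0 > mxv
      · rw [if_pos h, if_pos h, max_eq_left (le_of_lt h)]
      · rw [if_neg h, if_neg h, max_eq_right (not_lt.mp h)]
    have hmn : (if PySem.List.pyGetD nums ((c : Int) + d) 0 < mnv then (PySem.List.pyGetD nums ((c : Int) + d) 0, (c : Int) + d) else (mnv, mni)) = (pvExtAt nums (c + d.toNat)).1 := by
      rw [hvv, hstep1]
      by_cases h : nums.getD (c + d.toNat) 0 < mnv
      · rw [if_pos h, if_pos h, min_eq_left (le_of_lt h)]
      · rw [if_neg h, if_neg h, min_eq_right (not_lt.mp h)]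
    rw [hmx, hmn]
    rw [ih (by omega) _ _ _ (Prod.mk.eta)]
    rw [show ((c + 1 : Nat) : Int) = (c : Int) + 1 by push_cast; ring]
    rw [PySem.List.pyRange_one_succ_right (by omega : (0 : Int) ≤ (c : Int))]
    rw [List.findSome?_append]
    cases hfs : (PySem.List.pyRange 0 (c : Int) 1).findSome? (pvHit nums d v) with
    | some r => simp [hfs]
    | none =>
      simp only [hfs, Option.none_or]
      have hsing : ([(c : Int)].findSome? (pvHit nums d v)) = pvHit nums d v (c : Int) := by
        simp [List.findSome?]
        cases pvHit nums d v (c : Int) <;> rfl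
      rw [hsing]
      unfold pvHit
      rw [show ((c : Int) + d).toNat = c + d.toNat by omega]
      simp only []
      split_ifs <;> simp

-- B as a findSome?
theorem altB_eq (nums : List Int) (d v : Int) (hd : 0 ≤ d) (hne : nums ≠ []) :
    findIndices_alt nums d v =
      ((PySem.List.pyRange 0 ((nums.length : Int) - d) 1).findSome?
        (pvHit nums d v)).getD [-1, -1] := by
  have hn1 : 0 < nums.length := by
    cases nums with
    | nil => exact absurd rfl hne
    | cons a t => simp
  simp only [findIndices_alt]
  by_cases hcase : ((nums.length : Int) - 1 - d) < 0
  · rw [PySem.List.pyRange_neg_one_eq_nil (by omega),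
      PySem.List.pyRange_one_eq_nil (by omega)]
    rfl
  · push_neg at hcase
    rw [PySem.List.pyRange_neg_one_cons (by omega)]
    rw [List.foldl_cons]
    show (((PySem.List.pyRange ((nums.length : Int) - 1 - d - 1) (-1) (-1)).foldl
        (fun (s : Option (Int × Int) × Option (Int × Int) × List Int) i =>
        let j := i + d
        let vv := PySem.List.pyGetD nums j 0
        let mx := match s.1 with
          | none => (vv, j)
          | some (mv, mi) => if vv > mv then (vv, j) else (mv, mi)
        let mn := match s.2.1 with
          | none => (vv, j)
          | some (mv, mi) => if vv < mv then (vv, j) else (mv, mi)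
        let cur := PySem.List.pyGetD nums i 0
        let best := if |mx.1 - cur| ≥ v then [i, mx.2]
                    else if |mn.1 - cur| ≥ v then [i, mn.2]
                    else s.2.2
        (some mx, some mn, best))
        (some (PySem.List.pyGetD nums ((nums.length : Int) - 1 - d + d) 0, (nums.length : Int) - 1 - d + d),
         some (PySem.List.pyGetD nums ((nums.length : Int) - 1 - d + d) 0, (nums.length : Int) - 1 - d + d),
         if |PySem.List.pyGetD nums ((nums.length : Int) - 1 - d + d) 0 - PySem.List.pyGetD nums ((nums.length : Int) - 1 - d) 0| ≥ v then [(nums.length : Int) - 1 - d, (nums.length : Int) - 1 - d + d]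
         else if |PySem.List.pyGetD nums ((nums.length : Int) - 1 - d + d) 0 - PySem.List.pyGetD nums ((nums.length : Int) - 1 - d) 0| ≥ v then [(nums.length : Int) - 1 - d, (nums.length : Int) - 1 - d + d]
         else [-1, -1])).2.2)
      = ((PySem.List.pyRange 0 ((nums.length : Int) - d) 1).findSome? (pvHit nums d v)).getD [-1, -1]
    rw [show (nums.length : Int) - 1 - d + d = (nums.length : Int) - 1 by ring]
    have hlast : PySem.List.pyGetD nums ((nums.length : Int) - 1) 0 = nums.getD (nums.length - 1) 0 := by
      rw [show (nums.length : Int) - 1 = ((nums.length - 1 : Nat) : Int) by omega,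
        PySem.List.pyGetD_natCast]
    have hE : pvExtAt nums (nums.length - 1)
        = ((nums.getD (nums.length - 1) 0, (nums.length : Int) - 1), (nums.getD (nums.length - 1) 0, (nums.length : Int) - 1)) := by
      rw [pvExtAt_last nums (nums.length - 1) (by omega)]
      rw [show ((nums.length - 1 : Nat) : Int) = (nums.length : Int) - 1 by omega]
    rw [hlast]
    have hfold := foldB nums d v hd ((nums.length : Int) - 1 - d).toNat
      (by omega)
      (if |nums.getD (nums.length - 1) 0 - PySem.List.pyGetD nums ((nums.length : Int) - 1 - d) 0| ≥ v then [(nums.length : Int) - 1 - d, (nums.length : Int) - 1]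
       else if |nums.getD (nums.length - 1) 0 - PySem.List.pyGetD nums ((nums.length : Int) - 1 - d) 0| ≥ v then [(nums.length : Int) - 1 - d, (nums.length : Int) - 1]
       else [-1, -1])
      (nums.getD (nums.length - 1) 0, (nums.length : Int) - 1) (nums.getD (nums.length - 1) 0, (nums.length : Int) - 1)
      (by
        rw [show (((nums.length : Int) - 1 - d).toNat + d.toNat) = nums.length - 1 by omega, hE])
    rw [Int.toNat_of_nonneg hcase] at hfold
    rw [hfold]
    rw [show (nums.length : Int) - d = ((nums.length : Int) - 1 - d) + 1 by ring]
    rw [PySem.List.pyRange_one_succ_right hcase]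
    rw [List.findSome?_append]
    cases hfs : (PySem.List.pyRange 0 ((nums.length : Int) - 1 - d) 1).findSome? (pvHit nums d v) with
    | some r => simp [hfs]
    | none =>
      simp only [hfs, Option.none_or]
      have hsing : ([(nums.length : Int) - 1 - d].findSome? (pvHit nums d v)) = pvHit nums d v ((nums.length : Int) - 1 - d) := by
        simp [List.findSome?]
        cases pvHit nums d v ((nums.length : Int) - 1 - d) <;> rfl
      rw [hsing]
      unfold pvHit
      rw [show (nums.length : Int) - 1 - d + d = (nums.length : Int) - 1 by ring]
      rw [show ((nums.length : Int) - 1).toNat = nums.length - 1 by omega]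
      rw [hE]
      simp only []
      split_ifs <;> simp

-- A as the same findSome?
theorem eqA (nums : List Int) (d v : Int) (hd : 0 ≤ d) (hne : nums ≠ [])
    (hdom : d ≤ (nums.length : Int) ∨ 2 * (nums.length : Int) ≤ d) :
    findIndices nums d v =
      ((PySem.List.pyRange 0 ((nums.length : Int) - d) 1).findSome?
        (pvHit nums d v)).getD [-1, -1] := by
  have hn1 : 0 < nums.length := by
    cases nums with
    | nil => exact absurd rfl hne
    | cons a t => simp
  simp only [findIndices]
  rw [loopA_eq]
  rcases hdom with hle | hge
  · -- indexDifference ≤ len(nums)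
    have h0 : (0 : Int) ≤ (nums.length : Int) - d := by omega
    rw [PySem.List.slice_to nums h0]
    set m : Nat := ((nums.length : Int) - d).toNat with hm
    have hmn : m ≤ nums.length := by omega
    rw [PySem.List.enumerate_eq_map_pyRange _ 0]
    have hlen : PySem.List.len (nums.take m) = (nums.length : Int) - d := by
      simp [PySem.List.len_eq]
      omega
    rw [hlen, pv_findSome?_map]
    congr 1
    apply pv_findSome?_congr
    intro j hj
    rw [PySem.List.mem_pyRange_one] at hj
    simp only []
    have hval : PySem.List.pyGetD (nums.take m) j 0 = PySem.List.pyGetD nums j 0 := by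
      rw [show j = ((j.toNat : Nat) : Int) by omega,
        PySem.List.pyGetD_natCast, PySem.List.pyGetD_natCast]
      exact pv_getD_take nums m j.toNat 0 (by omega)
    have hdict : ((PySem.List.pyRange ((nums.length : Int) - 2) (-1) (-1)).foldl (fun dict k =>
        let v := PySem.List.pyGetD nums k 0
        let e := dict.getD (k + 1) ((0, 0), (0, 0))
        let maxv := max v e.2.1
        let maxi := if v > e.2.1 then k else e.2.2
        let minv := min v e.1.1
        let mini := if v < e.1.1 then k else e.1.2
        dict.insert k ((minv, mini), (maxv, maxi)))
        ((PySem.Dict.empty).insert ((nums.length : Int) - 1)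
          ((PySem.List.pyGetD nums ((nums.length : Int) - 1) 0, (nums.length : Int) - 1),
           (PySem.List.pyGetD nums ((nums.length : Int) - 1) 0, (nums.length : Int) - 1)))).getD
        (j + d) ((0, 0), (0, 0)) = pvExtAt nums (j + d).toNat := by
      rw [show (nums.length : Int) - 2 = ((nums.length - 1 : Nat) : Int) - 1 by omega]
      rw [show j + d = (((j + d).toNat : Nat) : Int) by omega]
      apply dictFold nums (nums.length - 1) (by omega)
      · intro k h1 h2
        have hk : k = nums.length - 1 := by omega
        subst hk
        rw [show ((nums.length - 1 : Nat) : Int) = (nums.length : Int) - 1 by omega]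
        rw [PySem.Dict.getD_insert_self]
        rw [pvExtAt_last nums (nums.length - 1) (by omega)]
        rw [show (nums.length : Int) - 1 = ((nums.length - 1 : Nat) : Int) by omega,
          PySem.List.pyGetD_natCast]
      · omega
    rw [hdict, hval]
    unfold pvHit
    rfl
  · -- 2 * len(nums) ≤ indexDifference : the slice is empty, both sides [-1, -1]
    rw [show (nums.length : Int) - d = -(((d - (nums.length : Int)).toNat : Nat) : Int) by omega]
    rw [PySem.List.slice_to_neg_natCast nums ((d - (nums.length : Int)).toNat) (by omega)]
    rw [show nums.length - (d - (nums.length : Int)).toNat = 0 by omega, List.take_zero]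
    rw [PySem.List.enumerate_nil]
    rw [PySem.List.pyRange_one_eq_nil (by omega)]
    rfl

-- ===== VERDICT (by name: the statement is the Claim_ definition above) =====
theorem findIndices_spec : Claim_equal_findIndices := by
  intro nums d v _ hpre
  obtain ⟨hne, hd, hdom⟩ := hpre
  unfold Spec_findIndices
  rw [eqA nums d v hd hne hdom, altB_eq nums d v hd hne]
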